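-- pv_equiv track=rewrite | github.com/shubofan/LeetcodePython | Server.py | compute_penalty
-- ===== SOURCE A (Python) =====
-- def compute_penalty(log: str, time:int):
-- 	loglst = log.split(' ')
--
-- 	n = len(loglst)
--
-- 	total_penalty = 0
-- 	if not loglst:
-- 		return total_penalty
--
-- 	if time < 0:
-- 		return total_penalty
--
-- 	for i in range(len(loglst)):
-- 		if i < time and loglst[i] == '1':
-- 			total_penalty += 1
-- 		if i >= time and loglst[i] == '0':
-- 			total_penalty += 1
-- 	return total_penalty
-- ===== SOURCE B (Python) =====
-- def compute_penalty(log: str, time: int):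
-- 	if time < 0:
-- 		return 0
-- 	loglst = log.split(' ')
-- 	# baseline: penalty if the cutoff were 0 (every '0' token is a mismatch)
-- 	penalty = loglst.count('0')
-- 	# correct the baseline for the tokens that actually fall before the cutoff
-- 	for tok in loglst[:time]:
-- 		if tok == '1':
-- 			penalty += 1
-- 		elif tok == '0':
-- 			penalty -= 1
-- 	return penalty
-- ===== Notes on version B (the rewrite author's own statement) =====
-- stated objective: alternative
-- what changed: B computes a cutoff-0 baseline (count of all '0' tokens) in one pass and then corrects it by walking only the first `time` tokens (+1 for a '1', -1 for a '0'), instead of A's full-range loop testing each index against the cutoff.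
import Mathlib
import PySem

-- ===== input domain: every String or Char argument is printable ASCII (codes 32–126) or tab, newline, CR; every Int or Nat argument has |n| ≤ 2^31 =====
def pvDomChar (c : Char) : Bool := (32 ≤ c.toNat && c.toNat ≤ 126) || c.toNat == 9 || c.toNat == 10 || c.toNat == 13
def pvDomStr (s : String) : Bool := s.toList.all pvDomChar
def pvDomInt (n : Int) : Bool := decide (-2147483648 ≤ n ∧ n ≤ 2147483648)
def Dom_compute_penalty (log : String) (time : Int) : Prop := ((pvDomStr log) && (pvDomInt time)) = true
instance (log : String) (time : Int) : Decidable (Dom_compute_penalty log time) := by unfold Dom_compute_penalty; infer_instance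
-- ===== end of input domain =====

-- B replaces A's full-range loop by a cutoff-0 baseline (count of all '0' tokens) corrected over the prefix before the cutoff (alternative decomposition).

-- ===== PORT A =====
def compute_penalty (log : String) (time : Int) : Int :=
  let loglst := (PySem.Str.split? log " ").getD []
  let _n := (loglst.length : Int)
  if loglst = [] then 0
  else if time < 0 then 0
  else
    (PySem.List.pyRange 0 (loglst.length : Int) 1).foldl
      (fun acc i =>
        let acc := if i < time ∧ PySem.List.pyGetD loglst i "" = "1" then acc + 1 else acc
        if time ≤ i ∧ PySem.List.pyGetD loglst i "" = "0" then acc + 1 else acc)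
      0

-- ===== PORT B =====
def compute_penalty_alt (log : String) (time : Int) : Int :=
  if time < 0 then 0
  else
    let loglst := (PySem.Str.split? log " ").getD []
    let penalty : Int := (loglst.count "0" : Int)
    (PySem.List.slice loglst none (some time)).foldl
      (fun acc tok => if tok = "1" then acc + 1 else if tok = "0" then acc - 1 else acc)
      penalty

-- ===== PRECONDITION & SPEC =====
def Spec_compute_penalty (log : String) (time : Int) (out : Int) : Prop := out = compute_penalty_alt log time
instance (log : String) (time : Int) (out : Int) : Decidable (Spec_compute_penalty log time out) := by unfold Spec_compute_penalty; infer_instance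

-- ===== CLAIM (what is proved, stated in full; the proofs are below) =====
def Claim_equal_compute_penalty : Prop := ∀ (log : String) (time : Int), Dom_compute_penalty log time → Spec_compute_penalty log time (compute_penalty log time)

-- ===== LEMMAS AND PROOFS =====

-- '+1 if x == v' accumulation is the count of v.
lemma count_fold (l : List String) (v : String) (a : Int) :
    l.foldl (fun acc x => if x = v then acc + 1 else acc) a = a + (l.count v : Int) := by
  rw [PySem.List.foldl_ite_add_one (fun x => x = v), List.count_eq_countP]
  congr 2

-- B's correction fold: +1 per '1', -1 per '0'.
lemma correct_fold (l : List String) (a : Int) :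
    l.foldl (fun acc tok => if tok = "1" then acc + 1 else if tok = "0" then acc - 1 else acc) a
      = a + (l.count "1" : Int) - (l.count "0" : Int) := by
  induction l generalizing a with
  | nil => simp
  | cons x xs ih =>
    simp only [List.foldl_cons, List.count_cons, ih]
    by_cases h1 : x = "1" <;> by_cases h0 : x = "0" <;>
      simp [h1, h0] <;> first | omega | (push_cast; omega)

-- The loop of A counts '1's at indices < time and '0's at indices ≥ time.
lemma loop_eq_counts (l : List String) (t : Int) (ht : 0 ≤ t) :
    (PySem.List.pyRange 0 (l.length : Int) 1).foldl
      (fun acc i =>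
        let acc := if i < t ∧ PySem.List.pyGetD l i "" = "1" then acc + 1 else acc
        if t ≤ i ∧ PySem.List.pyGetD l i "" = "0" then acc + 1 else acc)
      0
    = ((l.take t.toNat).count "1" : Int) + ((l.drop t.toNat).count "0" : Int) := by
  by_cases hlen : t ≤ (l.length : Int)
  · rw [PySem.List.pyRange_one_append 0 t (l.length : Int) ht hlen, List.foldl_append]
    have e1 : ∀ (c : Int),
        (PySem.List.pyRange 0 t 1).foldl
          (fun acc i =>
            let acc := if i < t ∧ PySem.List.pyGetD l i "" = "1" then acc + 1 else acc
            if t ≤ i ∧ PySem.List.pyGetD l i "" = "0" then acc + 1 else acc) c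
        = c + ((l.take t.toNat).count "1" : Int) := by
      intro c
      have hlt : ((l.take t.toNat).length : Int) = t := by
        simp only [List.length_take]
        omega
      have hc := PySem.List.foldl_congr_mem (PySem.List.pyRange 0 t 1)
        (fun acc i =>
          let acc := if i < t ∧ PySem.List.pyGetD l i "" = "1" then acc + 1 else acc
          if t ≤ i ∧ PySem.List.pyGetD l i "" = "0" then acc + 1 else acc)
        (fun acc i => if PySem.List.pyGetD (l.take t.toNat) i "" = "1" then acc + 1 else acc) c
        (by
          intro acc i hi
          rw [PySem.List.mem_pyRange_one] at hi
          have h1 : (i < t) = True := eq_true hi.2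
          have h2 : (t ≤ i) = False := eq_false (by omega)
          have hg : PySem.List.pyGetD (l.take t.toNat) i "" = PySem.List.pyGetD l i "" := by
            have hi' : i = ((i.toNat : Nat) : Int) := (Int.toNat_of_nonneg hi.1).symm
            rw [hi', PySem.List.pyGetD_natCast, PySem.List.pyGetD_natCast]
            have hlt' : i.toNat < t.toNat := by omega
            simp [List.getD, hlt']
          simp only [h1, h2, true_and, false_and, if_false, hg])
      have hfold := PySem.List.foldl_pyRange_zero_pyGetD' (l.take t.toNat) ""
        (fun (a : Int) (x : String) => if x = "1" then a + 1 else a) c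
      rw [hlt] at hfold
      rw [hc, hfold, count_fold]
    have e2 : ∀ (c : Int),
        (PySem.List.pyRange t (l.length : Int) 1).foldl
          (fun acc i =>
            let acc := if i < t ∧ PySem.List.pyGetD l i "" = "1" then acc + 1 else acc
            if t ≤ i ∧ PySem.List.pyGetD l i "" = "0" then acc + 1 else acc) c
        = c + ((l.drop t.toNat).count "0" : Int) := by
      intro c
      have hc := PySem.List.foldl_congr_mem (PySem.List.pyRange t (l.length : Int) 1)
        (fun acc i =>
          let acc := if i < t ∧ PySem.List.pyGetD l i "" = "1" then acc + 1 else acc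
          if t ≤ i ∧ PySem.List.pyGetD l i "" = "0" then acc + 1 else acc)
        (fun acc i => if PySem.List.pyGetD l i "" = "0" then acc + 1 else acc) c
        (by
          intro acc i hi
          rw [PySem.List.mem_pyRange_one] at hi
          have h1 : (i < t) = False := eq_false (by omega)
          have h2 : (t ≤ i) = True := eq_true hi.1
          simp only [h1, h2, true_and, false_and, if_false])
      rw [hc,
        PySem.List.foldl_pyRange_pyGetD' l ""
          (fun (a : Int) (x : String) => if x = "0" then a + 1 else a) c ht,
        count_fold]
    rw [e1 0, e2]
    omega
  · have hc := PySem.List.foldl_congr_mem (PySem.List.pyRange 0 (l.length : Int) 1)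
      (fun acc i =>
        let acc := if i < t ∧ PySem.List.pyGetD l i "" = "1" then acc + 1 else acc
        if t ≤ i ∧ PySem.List.pyGetD l i "" = "0" then acc + 1 else acc)
      (fun acc i => if PySem.List.pyGetD l i "" = "1" then acc + 1 else acc) (0 : Int)
      (by
        intro acc i hi
        rw [PySem.List.mem_pyRange_one] at hi
        have h1 : (i < t) = True := eq_true (by omega)
        have h2 : (t ≤ i) = False := eq_false (by omega)
        simp only [h1, h2, true_and, false_and, if_false])
    rw [hc,
      PySem.List.foldl_pyRange_zero_pyGetD' l ""
        (fun (a : Int) (x : String) => if x = "1" then a + 1 else a) 0,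
      count_fold]
    have ht1 : l.take t.toNat = l := List.take_of_length_le (by omega)
    have ht2 : l.drop t.toNat = [] := List.drop_eq_nil_of_le (by omega)
    rw [ht1, ht2]
    simp

-- B's value equals the two-region count: zeros_total + ones_prefix - zeros_prefix.
lemma alt_eq_counts (l : List String) (t : Int) (ht : 0 ≤ t) :
    (PySem.List.slice l none (some t)).foldl
      (fun acc tok => if tok = "1" then acc + 1 else if tok = "0" then acc - 1 else acc)
      ((l.count "0" : Int))
    = ((l.take t.toNat).count "1" : Int) + ((l.drop t.toNat).count "0" : Int) := by
  rw [PySem.List.slice_to _ ht, correct_fold]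
  have hsplit : l.count "0" = (l.take t.toNat).count "0" + (l.drop t.toNat).count "0" := by
    conv_lhs => rw [← List.take_append_drop t.toNat l]
    exact List.count_append ..
  push_cast [hsplit]
  omega

-- ===== VERDICT (by name: the statement is the Claim_ definition above) =====
theorem compute_penalty_spec : Claim_equal_compute_penalty := by
  intro log time _
  unfold Spec_compute_penalty compute_penalty compute_penalty_alt
  set l := (PySem.Str.split? log " ").getD [] with hl
  by_cases hneg : time < 0
  · simp [hneg]
  · rw [not_lt] at hneg
    rcases eq_or_ne l [] with hnil | hnil
    · simp [hnil, PySem.List.slice, not_lt.mpr hneg]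
    · rw [if_neg hnil, if_neg (not_lt.mpr hneg), if_neg (not_lt.mpr hneg),
        loop_eq_counts l time hneg]
      exact (alt_eq_counts l time hneg).symm
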